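-- pv_equiv track=rewrite | github.com/jeffag2003/mapa-del-tesoro | Examen 1, Aguero Aguero Jefferson.py | elimine_aux
-- ===== SOURCE A (Python) =====
-- def elimine_aux(num, exp, encontrado, nuevo, dig):
--     if exp < 0:
--         return nuevo
--     temp = (num // (10 ** exp)) % 10
--
--     if temp == dig:
--         if not encontrado:
--             return elimine_aux(num, exp - 1, True, nuevo * 10 + temp, dig)
--         return elimine_aux(num, exp - 1, True, nuevo, dig)
--     return elimine_aux(num, exp - 1, encontrado, nuevo * 10 + temp, dig)
-- ===== SOURCE B (Python) =====
-- def elimine_aux(num, exp, encontrado, nuevo, dig):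
--     for e in range(exp, -1, -1):
--         temp = (num // (10 ** e)) % 10
--         if temp == dig:
--             if not encontrado:
--                 encontrado = True
--                 nuevo = nuevo * 10 + temp
--         else:
--             nuevo = nuevo * 10 + temp
--     return nuevo
-- ===== Notes on version B (the rewrite author's own statement) =====
-- stated objective: simpler
-- what changed: Replaced the five-argument tail recursion by a plain iterative for-loop over range(exp, -1, -1) that updates a local flag and accumulator.
import Mathlib
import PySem

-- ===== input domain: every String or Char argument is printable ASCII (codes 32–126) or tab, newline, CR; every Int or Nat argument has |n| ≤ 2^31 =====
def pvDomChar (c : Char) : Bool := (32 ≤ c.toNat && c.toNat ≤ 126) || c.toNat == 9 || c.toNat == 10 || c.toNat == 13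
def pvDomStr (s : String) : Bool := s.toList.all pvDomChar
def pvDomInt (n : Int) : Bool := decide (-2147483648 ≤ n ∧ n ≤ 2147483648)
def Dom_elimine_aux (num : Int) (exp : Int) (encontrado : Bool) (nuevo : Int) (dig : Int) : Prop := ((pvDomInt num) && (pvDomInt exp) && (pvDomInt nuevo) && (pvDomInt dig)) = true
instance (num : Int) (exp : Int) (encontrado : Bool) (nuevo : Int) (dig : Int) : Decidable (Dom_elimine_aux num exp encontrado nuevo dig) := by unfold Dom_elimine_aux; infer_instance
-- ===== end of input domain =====

-- B replaces A's five-argument tail recursion with a plain iterative loop over range(exp, -1, -1)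
-- updating a local flag and accumulator (objective: simpler decomposition, same cost).

-- ===== PORT A =====
def elimine_aux (num : Int) (exp : Int) (encontrado : Bool) (nuevo : Int) (dig : Int) : Int :=
  if exp < 0 then nuevo
  else
    let temp := PySem.Int.mod (PySem.Int.floordiv num (10 ^ exp.toNat)) 10
    if temp = dig then
      if !encontrado then elimine_aux num (exp - 1) true (nuevo * 10 + temp) dig
      else elimine_aux num (exp - 1) true nuevo dig
    else elimine_aux num (exp - 1) encontrado (nuevo * 10 + temp) dig
termination_by (exp + 1).toNat
decreasing_by all_goals omega

-- ===== PORT B =====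
def elimine_aux_alt (num : Int) (exp : Int) (encontrado : Bool) (nuevo : Int) (dig : Int) : Int :=
  ((PySem.List.pyRange exp (-1) (-1)).foldl
    (fun (st : Bool × Int) (e : Int) =>
      let temp := PySem.Int.mod (PySem.Int.floordiv num (10 ^ e.toNat)) 10
      if temp = dig then
        if !st.1 then (true, st.2 * 10 + temp) else st
      else (st.1, st.2 * 10 + temp))
    (encontrado, nuevo)).2

-- ===== PRECONDITION & SPEC =====
def Spec_elimine_aux (num : Int) (exp : Int) (encontrado : Bool) (nuevo : Int) (dig : Int) (out : Int) : Prop := out = elimine_aux_alt num exp encontrado nuevo dig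
instance (num : Int) (exp : Int) (encontrado : Bool) (nuevo : Int) (dig : Int) (out : Int) : Decidable (Spec_elimine_aux num exp encontrado nuevo dig out) := by unfold Spec_elimine_aux; infer_instance

-- ===== CLAIM (what is proved, stated in full; the proofs are below) =====
def Claim_equal_elimine_aux : Prop := ∀ (num : Int) (exp : Int) (encontrado : Bool) (nuevo : Int) (dig : Int), Dom_elimine_aux num exp encontrado nuevo dig → Spec_elimine_aux num exp encontrado nuevo dig (elimine_aux num exp encontrado nuevo dig)

-- ===== LEMMAS AND PROOFS =====
lemma elimine_key (num dig : Int) : ∀ (n : Nat) (exp : Int), exp < (n : Int) →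
    ∀ (enc : Bool) (nuevo : Int),
    elimine_aux num exp enc nuevo dig =
      ((PySem.List.pyRange exp (-1) (-1)).foldl
        (fun (st : Bool × Int) (e : Int) =>
          let temp := PySem.Int.mod (PySem.Int.floordiv num (10 ^ e.toNat)) 10
          if temp = dig then
            if !st.1 then (true, st.2 * 10 + temp) else st
          else (st.1, st.2 * 10 + temp))
        (enc, nuevo)).2 := by
  intro n
  induction n with
  | zero =>
    intro exp h enc nuevo
    rw [elimine_aux, if_pos (by omega : exp < 0),
      PySem.List.pyRange_neg_one_eq_nil (by omega : exp ≤ -1), List.foldl_nil]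
  | succ n ih =>
    intro exp h enc nuevo
    by_cases hx : exp < 0
    · rw [elimine_aux, if_pos hx,
        PySem.List.pyRange_neg_one_eq_nil (by omega : exp ≤ -1), List.foldl_nil]
    · rw [elimine_aux, if_neg hx,
        PySem.List.pyRange_neg_one_cons (by omega : (-1 : Int) < exp)]
      simp only [List.foldl_cons]
      by_cases hd : PySem.Int.mod (PySem.Int.floordiv num (10 ^ exp.toNat)) 10 = dig <;>
        cases enc <;>
        simp only [hd, Bool.not_true, Bool.not_false, Bool.false_eq_true, Bool.true_eq_false,
          if_true, if_false, reduceIte] <;>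
        rw [ih (exp - 1) (by omega)]

-- ===== VERDICT (by name: the statement is the Claim_ definition above) =====
theorem elimine_aux_spec : Claim_equal_elimine_aux := by
  intro num exp enc nuevo dig _
  unfold Spec_elimine_aux elimine_aux_alt
  exact elimine_key num dig (exp.toNat + 1) exp (by omega) enc nuevo
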